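-- pv_equiv track=rewrite | github.com/Aronh01/Genetic-Algorithm | alg_gen.py | decode_population
-- ===== SOURCE A (Python) =====
-- def decode_population(pop, P, N, B, a, b, dx):
--     arr = []
--     for p in pop:
--         r = []
--         for x in range(N):
--             t = p[x*B:(x+1)*B]
--             r.insert(x, 0)
--             for y in range(B):
--                 r[x] += t[y] * 2 ** (B-y-1)
--         arr.append(r)
--     return arr
-- ===== SOURCE B (Python) =====
-- def decode_population(pop, P, N, B, a, b, dx):
--     arr = []
--     for p in pop:
--         row = [0] * N
--         for i in range(len(row) * B):
--             row[i // B] = 2 * row[i // B] + p[i]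
--         arr.append(row)
--     return arr
-- ===== Notes on version B (the rewrite author's own statement) =====
-- stated objective: simpler
-- what changed: B replaces A's per-gene slicing, r.insert and per-bit powers 2**(B-y-1) by one flat loop over the bit indices of the chromosome that buckets each bit into row[i // B] by integer division, doubling the bucket in place; no slicing, no inner gene loop, no power table.
import Mathlib
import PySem

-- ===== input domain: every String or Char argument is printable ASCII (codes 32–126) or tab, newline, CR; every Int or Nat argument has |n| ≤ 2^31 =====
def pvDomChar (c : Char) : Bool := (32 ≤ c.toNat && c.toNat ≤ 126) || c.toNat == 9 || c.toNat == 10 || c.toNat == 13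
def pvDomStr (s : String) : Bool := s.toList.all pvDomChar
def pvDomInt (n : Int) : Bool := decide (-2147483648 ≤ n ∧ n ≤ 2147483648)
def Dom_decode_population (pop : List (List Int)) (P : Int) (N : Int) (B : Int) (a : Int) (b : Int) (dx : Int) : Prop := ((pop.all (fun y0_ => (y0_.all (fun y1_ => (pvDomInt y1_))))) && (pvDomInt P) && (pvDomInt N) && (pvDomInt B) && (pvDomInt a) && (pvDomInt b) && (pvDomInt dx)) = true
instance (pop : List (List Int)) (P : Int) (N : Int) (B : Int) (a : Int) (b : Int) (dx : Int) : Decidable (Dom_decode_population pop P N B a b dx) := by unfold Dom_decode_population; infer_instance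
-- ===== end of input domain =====

-- B replaces A's per-gene slicing, insert and per-bit powers 2**(B-y-1) by a single flat loop
-- over the chromosome's bit indices that buckets each bit into row[i // B] by integer division.


-- ===== PORT A =====
def decode_population (pop : List (List Int)) (P : Int) (N : Int) (B : Int) (a : Int) (b : Int) (dx : Int) : List (List Int) :=
  pop.foldl (fun arr p =>
    arr ++ [(PySem.List.pyRange 0 N 1).foldl (fun r x =>
      let t := PySem.List.slice p (some (x * B)) (some ((x + 1) * B))
      let r := PySem.List.insert r x (0 : Int)
      -- r[x] += t[y] * 2 ** (B-y-1); y ∈ range(B) gives B-y-1 ≥ 0, so the Nat exponent is exact;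
      -- pyGetD/pySetD are the total forms of the index read/write, used only under Pre_ (in range)
      (PySem.List.pyRange 0 B 1).foldl (fun r y =>
        PySem.List.pySetD r x (PySem.List.pyGetD r x 0 + PySem.List.pyGetD t y 0 * 2 ^ (B - y - 1).toNat)) r) []]) []

-- ===== PORT B =====
def decode_population_alt (pop : List (List Int)) (P : Int) (N : Int) (B : Int) (a : Int) (b : Int) (dx : Int) : List (List Int) :=
  pop.foldl (fun arr p =>
    arr ++ [
      -- row = [0] * N;  for i in range(len(row) * B): row[i // B] = 2 * row[i // B] + p[i]
      let row := PySem.List.pyRepeat [(0 : Int)] N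
      (PySem.List.pyRange 0 ((PySem.List.len row) * B) 1).foldl (fun row i =>
        PySem.List.pySetD row (PySem.Int.floordiv i B)
          (2 * PySem.List.pyGetD row (PySem.Int.floordiv i B) 0 + PySem.List.pyGetD p i 0)) row]) []

-- ===== PRECONDITION & SPEC =====
-- Pre_ is exactly A's return domain: with N > 0 and B > 0 and some chromosome shorter than
-- N*B bits, A raises IndexError reading t[y] (and Python B raises IndexError reading p[i]).
def Pre_decode_population (pop : List (List Int)) (P : Int) (N : Int) (B : Int) (a : Int) (b : Int) (dx : Int) : Prop :=
  N ≤ 0 ∨ B ≤ 0 ∨ ∀ p ∈ pop, N * B ≤ (p.length : Int)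
instance (pop : List (List Int)) (P : Int) (N : Int) (B : Int) (a : Int) (b : Int) (dx : Int) : Decidable (Pre_decode_population pop P N B a b dx) := by unfold Pre_decode_population; infer_instance
def pvWitness_decode_population : List (List Int) × Int × Int × Int × Int × Int × Int := ([[1, 0, 1, 1], [0, 1, 1, 0]], 2, 2, 2, 0, 3, 1)

def Spec_decode_population (pop : List (List Int)) (P : Int) (N : Int) (B : Int) (a : Int) (b : Int) (dx : Int) (out : List (List Int)) : Prop := out = decode_population_alt pop P N B a b dx
instance (pop : List (List Int)) (P : Int) (N : Int) (B : Int) (a : Int) (b : Int) (dx : Int) (out : List (List Int)) : Decidable (Spec_decode_population pop P N B a b dx out) := by unfold Spec_decode_population; infer_instance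

-- ===== CLAIM (what is proved, stated in full; the proofs are below) =====
def Claim_equal_decode_population : Prop := ∀ (pop : List (List Int)) (P : Int) (N : Int) (B : Int) (a : Int) (b : Int) (dx : Int), Dom_decode_population pop P N B a b dx → Pre_decode_population pop P N B a b dx → Spec_decode_population pop P N B a b dx (decode_population pop P N B a b dx)

-- ===== LEMMAS AND PROOFS =====

lemma pv_block (p : List Int) (bb : Nat) (pre suf : List Int) (js : List Nat) (v : Int)
    (hj : ∀ j ∈ js, j / bb = pre.length) :
    js.foldl (fun row j => row.set (j / bb) (2 * row.getD (j / bb) 0 + p.getD j 0)) (pre ++ v :: suf)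
      = pre ++ (js.foldl (fun acc j => 2 * acc + p.getD j 0) v) :: suf := by
  induction js generalizing v with
  | nil => simp
  | cons j js ih =>
    have hjj : j / bb = pre.length := hj j (by simp)
    have hget : (pre ++ v :: suf).getD pre.length 0 = v := by simp [List.getD]
    have hset : (pre ++ v :: suf).set pre.length (2 * v + p.getD j 0) = pre ++ (2 * v + p.getD j 0) :: suf := by
      simp [List.set_append_right]
    simp only [List.foldl_cons, hjj, hget, hset]
    exact ih _ (fun j hjm => hj j (by simp [hjm]))

lemma pv_flat (p : List Int) (bb : Nat) :
    ∀ (m : Nat) (pre : List Int),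
    (List.range' (pre.length * bb) (m * bb)).foldl
        (fun row j => row.set (j / bb) (2 * row.getD (j / bb) 0 + p.getD j 0))
        (pre ++ List.replicate m 0)
      = pre ++ (List.range' pre.length m).map
          (fun k => (List.range' (k * bb) bb).foldl (fun acc j => 2 * acc + p.getD j 0) 0) := by
  intro m
  induction m with
  | zero => intro pre; simp
  | succ m ih =>
    intro pre
    have hsplit : List.range' (pre.length * bb) ((m + 1) * bb)
        = List.range' (pre.length * bb) bb ++ List.range' (pre.length * bb + bb) (m * bb) := by
      rw [List.range'_append_1]; ring_nf
    rw [hsplit, List.foldl_append]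
    have hrep : List.replicate (m + 1) (0 : Int) = (0 : Int) :: List.replicate m 0 := rfl
    rw [hrep]
    rw [pv_block p bb pre (List.replicate m 0) _ 0
      (by
        intro j hjm
        rw [List.mem_range'_1] at hjm
        exact Nat.div_eq_of_lt_le hjm.1 (by rw [Nat.succ_mul]; omega))]
    have hpre' : (pre ++ [(List.range' (pre.length * bb) bb).foldl (fun acc j => 2 * acc + p.getD j 0) 0]).length * bb
        = pre.length * bb + bb := by simp [Nat.succ_mul]
    have := ih (pre ++ [(List.range' (pre.length * bb) bb).foldl (fun acc j => 2 * acc + p.getD j 0) 0])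
    rw [hpre'] at this
    rw [show pre ++ ((List.range' (pre.length * bb) bb).foldl (fun acc j => 2 * acc + p.getD j 0) 0) :: List.replicate m 0
        = (pre ++ [(List.range' (pre.length * bb) bb).foldl (fun acc j => 2 * acc + p.getD j 0) 0]) ++ List.replicate m 0 by simp]
    rw [this]
    rw [List.range'_succ]
    simp [Nat.succ_mul]
lemma pv_slice_eq_map (p : List Int) (s bb : Nat) (hlen : s + bb ≤ p.length) :
    (p.drop s).take bb = (List.range' s bb).map (fun j => p.getD j 0) := by
  apply List.ext_getElem
  · simp; omega
  · intro i hi1 hi2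
    simp only [List.getElem_take, List.getElem_drop, List.getElem_map, List.getElem_range']
    rw [List.getD_eq_getElem]
    · congr 1; omega
    · simp at hi1 ⊢; omega
lemma pv_main (p : List Int) (N B : Int) (hN : 0 < N) (hB : 0 < B) (hlen : N * B ≤ (p.length : Int)) :
    (PySem.List.pyRange 0 N 1).map (fun x =>
        (PySem.List.slice p (some (x * B)) (some ((x + 1) * B))).foldl (fun acc bit => 2 * acc + bit) 0)
      = (List.range (N.toNat * B.toNat)).foldl
          (fun row j => row.set (j / B.toNat) (2 * row.getD (j / B.toNat) 0 + p.getD j 0))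
          (List.replicate N.toNat 0) := by
  have hNc : ((N.toNat : Int)) = N := Int.toNat_of_nonneg (by omega)
  have hBc : ((B.toNat : Int)) = B := Int.toNat_of_nonneg (by omega)
  have hlenN : N.toNat * B.toNat ≤ p.length := by
    have : ((N.toNat * B.toNat : Nat) : Int) ≤ (p.length : Int) := by push_cast [hNc, hBc]; exact hlen
    exact_mod_cast this
  have hrhs := pv_flat p B.toNat N.toNat []
  simp only [List.length_nil, Nat.zero_mul, List.nil_append] at hrhs
  rw [List.range_eq_range', hrhs]
  rw [PySem.List.pyRange_one, List.map_map]
  have hn : (N - 0).toNat = N.toNat := by omega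
  rw [hn, List.range_eq_range']
  apply List.map_congr_left
  intro k hk
  rw [List.mem_range'_1] at hk
  have hx1 : ((0 : Int) + ↑k) * B = ((k * B.toNat : Nat) : Int) := by push_cast [hBc]; ring
  have hx2 : ((0 : Int) + ↑k + 1) * B = (((k + 1) * B.toNat : Nat) : Int) := by push_cast [hBc]; ring
  simp only [Function.comp]
  rw [hx1, hx2, PySem.List.slice_natCast]
  have htk : (k + 1) * B.toNat - k * B.toNat = B.toNat := by simp [Nat.succ_mul]
  rw [htk, pv_slice_eq_map p (k * B.toNat) B.toNat (by nlinarith [hk.2]), List.foldl_map]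
lemma pv_last_fold (f : Int → Int) (ys : List Int) (r : List Int) (w : Int) :
    ys.foldl (fun s y => PySem.List.pySetD s (r.length : Int) (PySem.List.pyGetD s (r.length : Int) 0 + f y)) (r ++ [w])
      = r ++ [w + (ys.map f).sum] := by
  induction ys generalizing w with
  | nil => simp
  | cons y ys ih =>
    have hget : PySem.List.pyGetD (r ++ [w]) (r.length : Int) 0 = w := by
      simp [PySem.List.pyGetD_natCast, List.getD]
    have hset : PySem.List.pySetD (r ++ [w]) (r.length : Int) (w + f y) = r ++ [w + f y] := by
      simp [PySem.List.pySetD_natCast, List.set_append_right]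
    simp only [List.foldl_cons, hget, hset, ih, List.map_cons, List.sum_cons]
    ring_nf
lemma pv_sum_weights (t : List Int) :
    (((List.range t.length).map (fun k => t.getD k 0 * 2 ^ (t.length - 1 - k))).sum)
      = t.foldl (fun acc bit => 2 * acc + bit) 0 := by
  induction t with
  | nil => simp
  | cons c t ih =>
    have hacc : ∀ (u : List Int) (a : Int),
        u.foldl (fun acc bit => 2 * acc + bit) a = a * 2 ^ u.length + u.foldl (fun acc bit => 2 * acc + bit) 0 := by
      intro u
      induction u with
      | nil => intro a; simp
      | cons d u ihu =>
        intro a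
        simp only [List.foldl_cons, List.length_cons]
        rw [ihu (2 * a + d), ihu (2 * 0 + d)]
        ring
    rw [List.foldl_cons, hacc t (2 * 0 + c)]
    simp only [List.length_cons, List.range_succ_eq_map, List.map_cons, List.map_map, List.sum_cons]
    have : ∀ k, ((fun k => (c :: t).getD k 0 * 2 ^ (t.length + 1 - 1 - k)) ∘ Nat.succ) k
        = (fun k => t.getD k 0 * 2 ^ (t.length - 1 - k)) k := by
      intro k; simp [Function.comp, List.getD]
      exact Or.inl (by omega)
    rw [List.map_congr_left (fun k _ => this k), ih]
    simp [List.getD]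
lemma pv_inner_eq (B : Int) (t r : List Int) (ht : t.length = B.toNat) :
    (PySem.List.pyRange 0 B 1).foldl (fun s y =>
        PySem.List.pySetD s (r.length : Int) (PySem.List.pyGetD s (r.length : Int) 0 + PySem.List.pyGetD t y 0 * 2 ^ (B - y - 1).toNat)) (r ++ [0])
      = r ++ [t.foldl (fun acc bit => 2 * acc + bit) 0] := by
  rw [pv_last_fold (fun y => PySem.List.pyGetD t y 0 * 2 ^ (B - y - 1).toNat)]
  rw [PySem.List.pyRange_one]
  have hB' : (B - 0).toNat = t.length := by omega
  rw [hB', List.map_map]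
  have hmap : ∀ k ∈ List.range t.length,
      ((fun y => PySem.List.pyGetD t y 0 * 2 ^ (B - y - 1).toNat) ∘ (fun k : Nat => (0 : Int) + k)) k
        = (fun k => t.getD k 0 * 2 ^ (t.length - 1 - k)) k := by
    intro k hk
    simp only [List.mem_range] at hk
    simp [Function.comp, PySem.List.pyGetD_natCast]
    exact Or.inl (by omega)
  rw [List.map_congr_left hmap, pv_sum_weights]
  simp
lemma pv_row_eq (p : List Int) (N B : Int)
    (hchunk : ∀ x : Int, 0 ≤ x → x < N → (PySem.List.slice p (some (x * B)) (some ((x + 1) * B))).length = B.toNat) :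
    (PySem.List.pyRange 0 N 1).foldl (fun r x =>
        let t := PySem.List.slice p (some (x * B)) (some ((x + 1) * B))
        let r' := PySem.List.insert r x (0 : Int)
        (PySem.List.pyRange 0 B 1).foldl (fun s y =>
          PySem.List.pySetD s x (PySem.List.pyGetD s x 0 + PySem.List.pyGetD t y 0 * 2 ^ (B - y - 1).toNat)) r') []
      = (PySem.List.pyRange 0 N 1).map (fun x =>
          (PySem.List.slice p (some (x * B)) (some ((x + 1) * B))).foldl (fun acc bit => 2 * acc + bit) 0) := by
  rw [show (PySem.List.pyRange 0 N 1).map (fun x =>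
          (PySem.List.slice p (some (x * B)) (some ((x + 1) * B))).foldl (fun acc bit => 2 * acc + bit) 0)
      = (PySem.List.pyRange 0 N 1).foldl (fun row x =>
          row ++ [(PySem.List.slice p (some (x * B)) (some ((x + 1) * B))).foldl (fun acc bit => 2 * acc + bit) 0]) [] by
    simpa using (PySem.List.foldl_append_singleton_eq_map
      (fun x => (PySem.List.slice p (some (x * B)) (some ((x + 1) * B))).foldl (fun acc bit => 2 * acc + bit) 0)
      (PySem.List.pyRange 0 N 1) []).symm]
  rw [PySem.List.pyRange_one 0 N]
  have main : ∀ n : Nat, (n : Int) ≤ N →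
      ((List.range n).map (fun k : Nat => (0 : Int) + k)).foldl (fun r x =>
        let t := PySem.List.slice p (some (x * B)) (some ((x + 1) * B))
        let r' := PySem.List.insert r x (0 : Int)
        (PySem.List.pyRange 0 B 1).foldl (fun s y =>
          PySem.List.pySetD s x (PySem.List.pyGetD s x 0 + PySem.List.pyGetD t y 0 * 2 ^ (B - y - 1).toNat)) r') []
      = ((List.range n).map (fun k : Nat => (0 : Int) + k)).foldl (fun row x =>
          row ++ [(PySem.List.slice p (some (x * B)) (some ((x + 1) * B))).foldl (fun acc bit => 2 * acc + bit) 0]) []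
      ∧ (((List.range n).map (fun k : Nat => (0 : Int) + k)).foldl (fun row x =>
          row ++ [(PySem.List.slice p (some (x * B)) (some ((x + 1) * B))).foldl (fun acc bit => 2 * acc + bit) 0]) []).length = n := by
    intro n
    induction n with
    | zero => intro _; simp
    | succ n ih =>
      intro hn
      have hn' : (n : Int) ≤ N := by push_cast at hn ⊢; omega
      obtain ⟨ihEq, ihLen⟩ := ih hn'
      set t := PySem.List.slice p (some (((0 : Int) + n) * B)) (some (((0 : Int) + n + 1) * B)) with ht
      set rB := ((List.range n).map (fun k : Nat => (0 : Int) + k)).foldl (fun row x =>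
          row ++ [(PySem.List.slice p (some (x * B)) (some ((x + 1) * B))).foldl (fun acc bit => 2 * acc + bit) 0]) [] with hrB
      have htlen : t.length = B.toNat := by
        have := hchunk ((0 : Int) + n) (by omega) (by push_cast at hn ⊢; omega)
        simpa [ht] using this
      have hins : PySem.List.insert rB ((0 : Int) + n) (0 : Int) = rB ++ [0] := by
        have : ((0 : Int) + n) = ((rB.length : Nat) : Int) := by rw [ihLen]; ring
        rw [this, PySem.List.insert_natCast rB rB.length 0 (le_refl _)]
        simp
      rw [List.range_succ, List.map_append, List.foldl_append, List.foldl_append, ihEq]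
      simp only [List.map_cons, List.map_nil, List.foldl_cons, List.foldl_nil, ← hrB]
      constructor
      · rw [hins, ← ht]
        have hidx : ((0 : Int) + n) = ((rB.length : Nat) : Int) := by rw [ihLen]; ring
        rw [hidx]
        exact pv_inner_eq B t rB htlen
      · simp [ihLen]
  by_cases hN : 0 ≤ N
  · have h : ((N - 0).toNat : Int) ≤ N := by omega
    exact (main (N - 0).toNat h).1
  · have h0 : (N - 0).toNat = 0 := by omega
    rw [h0]
    simp
lemma pv_row_const (p : List Int) (N B : Int) (hB : B ≤ 0) :
    (PySem.List.pyRange 0 N 1).foldl (fun r x =>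
        let t := PySem.List.slice p (some (x * B)) (some ((x + 1) * B))
        let r' := PySem.List.insert r x (0 : Int)
        (PySem.List.pyRange 0 B 1).foldl (fun s y =>
          PySem.List.pySetD s x (PySem.List.pyGetD s x 0 + PySem.List.pyGetD t y 0 * 2 ^ (B - y - 1).toNat)) r') []
      = List.replicate N.toNat 0 := by
  have hBr : PySem.List.pyRange 0 B 1 = [] := PySem.List.pyRange_one_eq_nil hB
  rw [PySem.List.pyRange_one 0 N]
  have main : ∀ n : Nat,
      ((List.range n).map (fun k : Nat => (0 : Int) + k)).foldl (fun r x =>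
        let t := PySem.List.slice p (some (x * B)) (some ((x + 1) * B))
        let r' := PySem.List.insert r x (0 : Int)
        (PySem.List.pyRange 0 B 1).foldl (fun s y =>
          PySem.List.pySetD s x (PySem.List.pyGetD s x 0 + PySem.List.pyGetD t y 0 * 2 ^ (B - y - 1).toNat)) r') []
      = List.replicate n 0 := by
    intro n
    induction n with
    | zero => simp
    | succ n ih =>
      rw [List.range_succ, List.map_append, List.foldl_append, ih]
      simp only [List.map_cons, List.map_nil, List.foldl_cons, List.foldl_nil, hBr]
      have hx : ((0 : Int) + n) = (((List.replicate n (0 : Int)).length : Nat) : Int) := by simp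
      rw [hx, PySem.List.insert_natCast _ _ 0 (by simp)]
      simp [List.replicate_succ']
  by_cases hN : 0 ≤ N
  · have := main (N - 0).toNat
    rw [this]; congr 1; omega
  · have h0 : (N - 0).toNat = 0 := by omega
    rw [h0]; simp [show N.toNat = 0 by omega]

lemma pv_chunk_len (p : List Int) (N B : Int) (hB : 0 ≤ B) (hlen : N * B ≤ (p.length : Int))
    (x : Int) (hx0 : 0 ≤ x) (hxN : x < N) :
    (PySem.List.slice p (some (x * B)) (some ((x + 1) * B))).length = B.toNat := by
  rw [PySem.List.length_slice]
  have hx1 : 0 ≤ (x + 1) * B := by positivity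
  have hx2 : 0 ≤ x * B := by positivity
  have hle1 : (x + 1) * B ≤ (p.length : Int) := by nlinarith
  have hle2 : x * B ≤ (p.length : Int) := by nlinarith
  have h1 : PySem.List.clampIdx p.length ((x + 1) * B) = ((x + 1) * B).toNat := by
    rw [show ((x + 1) * B) = (((x + 1) * B).toNat : Int) from (Int.toNat_of_nonneg hx1).symm,
        PySem.List.clampIdx_natCast]
    omega
  have h2 : PySem.List.clampIdx p.length (x * B) = (x * B).toNat := by
    rw [show (x * B) = ((x * B).toNat : Int) from (Int.toNat_of_nonneg hx2).symm,
        PySem.List.clampIdx_natCast]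
    omega
  rw [h1, h2]
  have hsplit : (x + 1) * B = x * B + B := by ring
  omega

lemma pv_per (p : List Int) (N B : Int) (hPre : N ≤ 0 ∨ B ≤ 0 ∨ N * B ≤ (p.length : Int)) :
    (PySem.List.pyRange 0 N 1).foldl (fun r x =>
        let t := PySem.List.slice p (some (x * B)) (some ((x + 1) * B))
        let r := PySem.List.insert r x (0 : Int)
        (PySem.List.pyRange 0 B 1).foldl (fun r y =>
          PySem.List.pySetD r x (PySem.List.pyGetD r x 0 + PySem.List.pyGetD t y 0 * 2 ^ (B - y - 1).toNat)) r) []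
      = (let row := PySem.List.pyRepeat [(0 : Int)] N
        (PySem.List.pyRange 0 ((PySem.List.len row) * B) 1).foldl (fun row i =>
          PySem.List.pySetD row (PySem.Int.floordiv i B)
            (2 * PySem.List.pyGetD row (PySem.Int.floordiv i B) 0 + PySem.List.pyGetD p i 0)) row) := by
  have hrow : PySem.List.pyRepeat [(0 : Int)] N = List.replicate N.toNat 0 :=
    PySem.List.pyRepeat_singleton 0 N
  by_cases hB : B ≤ 0
  · -- range(B) is empty on both sides: A leaves every inserted 0, B's loop is empty
    rw [pv_row_const p N B hB]
    simp only [hrow]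
    have hmul : ((List.replicate N.toNat (0 : Int)).length : Int) * B ≤ 0 :=
      mul_nonpos_of_nonneg_of_nonpos (by positivity) hB
    rw [show PySem.List.len (List.replicate N.toNat (0 : Int)) = ((List.replicate N.toNat (0:Int)).length : Int) from PySem.List.len_eq _]
    rw [PySem.List.pyRange_one_eq_nil hmul]
    rfl
  · push_neg at hB
    by_cases hN : N ≤ 0
    · rw [PySem.List.pyRange_one_eq_nil hN]
      simp only [hrow]
      rw [show PySem.List.len (List.replicate N.toNat (0 : Int)) = ((List.replicate N.toNat (0:Int)).length : Int) from PySem.List.len_eq _]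
      have hside : ((List.replicate N.toNat (0 : Int)).length : Int) * B ≤ 0 := by
        rw [List.length_replicate, show N.toNat = 0 from by omega]; simp
      rw [PySem.List.pyRange_one_eq_nil hside]
      simp [show N.toNat = 0 by omega]
    · push_neg at hN
      have hlen : N * B ≤ (p.length : Int) := by
        rcases hPre with h | h | h
        · omega
        · omega
        · exact h
      rw [pv_row_eq p N B (fun x hx0 hxN => pv_chunk_len p N B (by omega) hlen x hx0 hxN)]
      rw [pv_main p N B hN hB hlen]
      simp only [hrow]
      have hBc : ((B.toNat : Int)) = B := Int.toNat_of_nonneg (by omega)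
      rw [show PySem.List.len (List.replicate N.toNat (0 : Int)) = ((List.replicate N.toNat (0:Int)).length : Int) from PySem.List.len_eq _]
      rw [List.length_replicate]
      have hmul : ((N.toNat : Int)) * B = ((N.toNat * B.toNat : Nat) : Int) := by push_cast [hBc]; ring
      rw [hmul, PySem.List.pyRange_one]
      have hn : (((N.toNat * B.toNat : Nat) : Int) - 0).toNat = N.toNat * B.toNat := by omega
      rw [hn, List.foldl_map]
      apply List.foldl_ext
      intro row k hk
      rw [show (0 : Int) + (k : Int) = ((k : Nat) : Int) by ring,
          show (B : Int) = ((B.toNat : Nat) : Int) from hBc.symm, PySem.Int.floordiv_natCast]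
      simp only [PySem.List.pySetD_natCast, PySem.List.pyGetD_natCast, Int.toNat_natCast]
theorem final (pop : List (List Int)) (N B : Int)
    (hPre : N ≤ 0 ∨ B ≤ 0 ∨ ∀ p ∈ pop, N * B ≤ (p.length : Int)) :
    (pop.foldl (fun arr p =>
      arr ++ [(PySem.List.pyRange 0 N 1).foldl (fun r x =>
        let t := PySem.List.slice p (some (x * B)) (some ((x + 1) * B))
        let r := PySem.List.insert r x (0 : Int)
        (PySem.List.pyRange 0 B 1).foldl (fun r y =>
          PySem.List.pySetD r x (PySem.List.pyGetD r x 0 + PySem.List.pyGetD t y 0 * 2 ^ (B - y - 1).toNat)) r) []]) [])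
    = (pop.foldl (fun arr p =>
      arr ++ [
        let row := PySem.List.pyRepeat [(0 : Int)] N
        (PySem.List.pyRange 0 ((PySem.List.len row) * B) 1).foldl (fun row i =>
          PySem.List.pySetD row (PySem.Int.floordiv i B)
            (2 * PySem.List.pyGetD row (PySem.Int.floordiv i B) 0 + PySem.List.pyGetD p i 0)) row]) []) := by
  have hA := PySem.List.foldl_append_singleton_eq_map (fun p : List Int =>
      (PySem.List.pyRange 0 N 1).foldl (fun r x =>
        let t := PySem.List.slice p (some (x * B)) (some ((x + 1) * B))
        let r := PySem.List.insert r x (0 : Int)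
        (PySem.List.pyRange 0 B 1).foldl (fun r y =>
          PySem.List.pySetD r x (PySem.List.pyGetD r x 0 + PySem.List.pyGetD t y 0 * 2 ^ (B - y - 1).toNat)) r) []) pop ([] : List (List Int))
  have hB := PySem.List.foldl_append_singleton_eq_map (fun p : List Int =>
      let row := PySem.List.pyRepeat [(0 : Int)] N
      (PySem.List.pyRange 0 ((PySem.List.len row) * B) 1).foldl (fun row i =>
          PySem.List.pySetD row (PySem.Int.floordiv i B)
            (2 * PySem.List.pyGetD row (PySem.Int.floordiv i B) 0 + PySem.List.pyGetD p i 0)) row) pop ([] : List (List Int))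
  simp only [List.nil_append] at hA hB
  rw [hA, hB]
  apply List.map_congr_left
  intro p hp
  apply pv_per p N B
  rcases hPre with h | h | h
  · exact Or.inl h
  · exact Or.inr (Or.inl h)
  · exact Or.inr (Or.inr (h p hp))

-- ===== VERDICT (by name: the statement is the Claim_ definition above) =====
theorem decode_population_spec : Claim_equal_decode_population := by
  intro pop P N B a b dx hDom hPre
  unfold Spec_decode_population decode_population decode_population_alt
  exact final pop N B hPre
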